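-- pv_equiv track=rewrite | github.com/toolboxmd/karpathy-wiki | scripts/wiki-lint-tags.py | _is_prefix_synonym
-- ===== SOURCE A (Python) =====
-- def _is_prefix_synonym(a: str, b: str) -> bool:
--     if a == b:
--         return False
--     al, bl = a.lower(), b.lower()
--     shortest = min(len(al), len(bl))
--     common = 0
--     for i in range(shortest):
--         if al[i] == bl[i]:
--             common += 1
--         else:
--             break
--     return common >= 5
-- ===== SOURCE B (Python) =====
-- def _is_prefix_synonym(a: str, b: str) -> bool:
--     al, bl = a.lower(), b.lower()
--     return a != b and len(al) >= 5 and len(bl) >= 5 and al[:5] == bl[:5]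
-- ===== Notes on version B (the rewrite author's own statement) =====
-- stated objective: simpler
-- what changed: Replaced the char-by-char prefix-counting loop with a loop-free closed-form predicate: both lowered strings have length >= 5 and their first 5 characters (a single slice comparison) agree.
import Mathlib
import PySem

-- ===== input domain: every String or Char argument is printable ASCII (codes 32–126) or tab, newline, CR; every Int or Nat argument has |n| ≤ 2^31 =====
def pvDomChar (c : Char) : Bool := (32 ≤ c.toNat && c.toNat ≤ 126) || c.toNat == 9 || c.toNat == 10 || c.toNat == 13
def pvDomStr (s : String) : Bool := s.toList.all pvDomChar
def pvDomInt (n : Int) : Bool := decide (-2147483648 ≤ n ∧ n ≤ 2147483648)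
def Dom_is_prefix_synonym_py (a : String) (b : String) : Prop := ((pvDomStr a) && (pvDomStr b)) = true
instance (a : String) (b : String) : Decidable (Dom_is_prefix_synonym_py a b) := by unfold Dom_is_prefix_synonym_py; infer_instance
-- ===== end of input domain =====

-- B replaces A's char-by-char prefix-counting loop with a loop-free closed-form
-- predicate (both lowered lengths >= 5 and the first 5 characters agree); objective: simpler.


-- ===== PORT A =====
-- the 'for i in range(shortest): if al[i]==bl[i]: common+=1 else: break' loop,
-- as the obvious paired recursion over the two character lists with the 'common' accumulator
def pvCommonLoop : List Char → List Char → Nat → Nat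
  | x :: xs, y :: ys, c => if x == y then pvCommonLoop xs ys (c + 1) else c
  | _, _, c => c

def is_prefix_synonym_py (a : String) (b : String) : Bool :=
  if a == b then false
  else
    let al := (PySem.Str.lower a).toList
    let bl := (PySem.Str.lower b).toList
    let common := pvCommonLoop al bl 0
    decide (common ≥ 5)

-- ===== PORT B =====
def is_prefix_synonym_py_alt (a : String) (b : String) : Bool :=
  let al := (PySem.Str.lower a).toList
  let bl := (PySem.Str.lower b).toList
  (a != b) && decide (al.length ≥ 5) && decide (bl.length ≥ 5)
    && (PySem.List.slice al none (some 5) == PySem.List.slice bl none (some 5))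

-- ===== PRECONDITION & SPEC =====
def Spec_is_prefix_synonym_py (a : String) (b : String) (out : Bool) : Prop := out = is_prefix_synonym_py_alt a b
instance (a : String) (b : String) (out : Bool) : Decidable (Spec_is_prefix_synonym_py a b out) := by unfold Spec_is_prefix_synonym_py; infer_instance

-- ===== CLAIM (what is proved, stated in full; the proofs are below) =====
def Claim_equal_is_prefix_synonym_py : Prop := ∀ (a : String) (b : String), Dom_is_prefix_synonym_py a b → Spec_is_prefix_synonym_py a b (is_prefix_synonym_py a b)

-- ===== LEMMAS AND PROOFS =====

theorem pvCommonLoop_acc (xs : List Char) : ∀ (ys : List Char) (c : Nat),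
    pvCommonLoop xs ys c = c + pvCommonLoop xs ys 0 := by
  induction xs with
  | nil => intro ys c; cases ys <;> simp [pvCommonLoop]
  | cons x xs ih =>
    intro ys c
    cases ys with
    | nil => simp [pvCommonLoop]
    | cons y ys =>
      by_cases h : x = y
      · rw [show pvCommonLoop (x :: xs) (y :: ys) c = pvCommonLoop xs ys (c + 1) from by
            simp [pvCommonLoop, h],
          show pvCommonLoop (x :: xs) (y :: ys) 0 = pvCommonLoop xs ys 1 from by
            simp [pvCommonLoop, h],
          ih ys (c + 1), ih ys 1]
        omega
      · simp [pvCommonLoop, h]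

theorem pvCommonLoop_ge (xs : List Char) : ∀ (ys : List Char) (n : Nat),
    (pvCommonLoop xs ys 0 ≥ n) ↔ (n ≤ xs.length ∧ n ≤ ys.length ∧ xs.take n = ys.take n) := by
  induction xs with
  | nil => intro ys n; cases ys <;> cases n <;> simp [pvCommonLoop]
  | cons x xs ih =>
    intro ys n
    cases ys with
    | nil => cases n <;> simp [pvCommonLoop]
    | cons y ys =>
      cases n with
      | zero => simp
      | succ m =>
        by_cases h : x = y
        · have ihm := ih ys m
          rw [show pvCommonLoop (x :: xs) (y :: ys) 0 = pvCommonLoop xs ys 1 from by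
              simp [pvCommonLoop, h],
            pvCommonLoop_acc xs ys 1]
          constructor
          · intro hge
            rcases ihm.mp (by omega) with ⟨l1, l2, teq⟩
            refine ⟨by simp; omega, by simp; omega, ?_⟩
            simp [List.take_succ_cons, h, teq]
          · rintro ⟨l1, l2, teq⟩
            simp [List.take_succ_cons, h] at teq
            have := ihm.mpr ⟨by simp at l1; omega, by simp at l2; omega, teq⟩
            omega
        · constructor
          · intro hge
            rw [show pvCommonLoop (x :: xs) (y :: ys) 0 = 0 from by simp [pvCommonLoop, h]] at hge
            omega
          · rintro ⟨-, -, teq⟩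
            simp [List.take_succ_cons, h] at teq

-- ===== VERDICT (by name: the statement is the Claim_ definition above) =====
theorem is_prefix_synonym_py_spec : Claim_equal_is_prefix_synonym_py := by
  intro a b _
  unfold Spec_is_prefix_synonym_py is_prefix_synonym_py is_prefix_synonym_py_alt
  by_cases hab : a = b
  · simp [hab]
  · have key := pvCommonLoop_ge (PySem.Chars.lower a.toList) (PySem.Chars.lower b.toList) 5
    simp only [PySem.Str.toList_lower]
    rw [if_neg (by simpa using hab), Bool.eq_iff_iff]
    have hs : ∀ (l : List Char), PySem.List.slice l none (some 5) = l.take 5 := fun l => by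
      simpa using PySem.List.slice_to (xs := l) (b := 5) (by norm_num)
    simp only [hs, decide_eq_true_eq, Bool.and_eq_true, bne_iff_ne, ne_eq, beq_iff_eq, ge_iff_le]
    constructor
    · intro h
      rcases key.mp h with ⟨h1, h2, h3⟩
      exact ⟨⟨⟨hab, h1⟩, h2⟩, h3⟩
    · rintro ⟨⟨⟨-, h1⟩, h2⟩, h3⟩
      exact key.mpr ⟨h1, h2, h3⟩
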